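-- pv_equiv track=rewrite | github.com/romech/vertex-code-analysis | ai_test.py | insert_linenum
-- ===== SOURCE A (Python) =====
-- def insert_linenum(source_str, target_str='\n'):
--     count = 1
--     result = ""
--     splits = source_str.split(target_str)
--
--     for part in splits[:-1]:
--         result += part + target_str + "line " + str(count) + ": "
--         count += 1
--
--     result += splits[-1]  # append the last part without any addition
--     return result
-- ===== SOURCE B (Python) =====
-- def insert_linenum(source_str, target_str='\n'):
--     if target_str == '':
--         raise ValueError('empty separator')
--     pieces = []
--     count = 1
--     rem = source_str
--     while True:
--         j = rem.find(target_str)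
--         if j == -1:
--             pieces.append(rem)
--             break
--         pieces.append(rem[:j] + target_str + "line " + str(count) + ": ")
--         count += 1
--         rem = rem[j + len(target_str):]
--     return "".join(pieces)
-- ===== Notes on version B (the rewrite author's own statement) =====
-- stated objective: alternative
-- what changed: B replaces A's split-then-rebuild (split on the delimiter, then re-join the pieces while counting) by a single left-to-right scan that locates each delimiter occurrence with str.find, emits the preceding text plus the numbered label, and joins the collected pieces once at the end; B guards the no-delimiter case explicitly, where both raise ValueError.
import Mathlib
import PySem

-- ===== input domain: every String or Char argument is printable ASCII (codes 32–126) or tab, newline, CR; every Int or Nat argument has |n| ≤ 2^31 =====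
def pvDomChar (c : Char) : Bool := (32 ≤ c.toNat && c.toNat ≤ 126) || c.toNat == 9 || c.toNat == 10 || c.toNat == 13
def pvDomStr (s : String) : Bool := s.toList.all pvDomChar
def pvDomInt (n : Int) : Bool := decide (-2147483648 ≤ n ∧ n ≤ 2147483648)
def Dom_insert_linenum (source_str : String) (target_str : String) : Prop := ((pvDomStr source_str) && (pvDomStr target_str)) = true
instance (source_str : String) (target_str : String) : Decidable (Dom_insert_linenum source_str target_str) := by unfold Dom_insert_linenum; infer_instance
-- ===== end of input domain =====

-- B replaces A's split-then-rebuild by a single find-driven scan that emits labelled pieces and joins them once (objective: alternative algorithm, similar cost).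

-- ===== PORT A =====
-- A: splits = source.split(target); for part in splits[:-1]: result += part + target + "line " + str(count) + ": "; count += 1; then result += splits[-1]
def insert_linenum (source_str : String) (target_str : String) : String :=
  match PySem.Chars.split? source_str.toList target_str.toList with
  | none => ""   -- Python's split raises ValueError (empty separator) here; excluded by Pre_
  | some splits =>
      let st := (PySem.List.slice splits none (some (-1))).foldl
        (fun (st : Int × List Char) part =>
          (st.1 + 1,
           st.2 ++ part ++ target_str.toList ++ "line ".toList
             ++ (PySem.Int.toStr st.1).toList ++ ": ".toList))
        (1, [])
      String.ofList (st.2 ++ (PySem.List.pyGet? splits (-1)).getD [])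

-- ===== PORT B =====
-- Source B's while-loop: each iteration finds the next delimiter in the remaining suffix and emits one piece;
-- fuel bounds the iteration count (every iteration consumes at least one character when the separator is nonempty).
def pvAltGo (sep : List Char) (fuel : Nat) (rem : List Char) (count : Int) : List (List Char) :=
  match fuel with
  | 0 => [rem]
  | fuel + 1 =>
    let j := PySem.Chars.find rem sep
    if j = -1 then [rem]
    else (rem.take j.toNat ++ sep ++ "line ".toList
            ++ (PySem.Int.toStr count).toList ++ ": ".toList)
         :: pvAltGo sep fuel (rem.drop (j.toNat + sep.length)) (count + 1)

def insert_linenum_alt (source_str : String) (target_str : String) : String :=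
  if target_str = "" then ""   -- Source B raises ValueError here; excluded by Pre_
  else String.ofList (PySem.Chars.join []
    (pvAltGo target_str.toList (source_str.toList.length + 1) source_str.toList 1))

-- ===== PRECONDITION & SPEC =====
-- Pre_ excludes only the empty separator, on which both A (str.split with an empty separator) and B raise ValueError.
def Pre_insert_linenum (source_str : String) (target_str : String) : Prop := target_str ≠ ""
instance (source_str : String) (target_str : String) : Decidable (Pre_insert_linenum source_str target_str) := by unfold Pre_insert_linenum; infer_instance
def pvWitness_insert_linenum : String × String := ("a\nb\nc", "\n")

def Spec_insert_linenum (source_str : String) (target_str : String) (out : String) : Prop := out = insert_linenum_alt source_str target_str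
instance (source_str : String) (target_str : String) (out : String) : Decidable (Spec_insert_linenum source_str target_str out) := by unfold Spec_insert_linenum; infer_instance

-- ===== CLAIM (what is proved, stated in full; the proofs are below) =====
def Claim_equal_insert_linenum : Prop := ∀ (source_str : String) (target_str : String), Dom_insert_linenum source_str target_str → Pre_insert_linenum source_str target_str → Spec_insert_linenum source_str target_str (insert_linenum source_str target_str)

-- ===== LEMMAS AND PROOFS =====

def pvGlue (pre : List Char) : List (List Char) → List (List Char)
  | [] => [pre]
  | x :: xs => (pre ++ x) :: xs
theorem pvGlue_glue (a b : List Char) (xs : List (List Char)) :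
    pvGlue a (pvGlue b xs) = pvGlue (a ++ b) xs := by
  cases xs <;> simp [pvGlue]
theorem pvGo_spec (sep : List Char) (hsep : sep ≠ []) :
    ∀ l fuel (cur : List Char) (acc : List (List Char)), l.length < fuel →
      PySem.Chars.splitOn.go sep fuel l cur acc
        = acc.reverse ++ pvGlue cur.reverse (PySem.Chars.splitOn.go sep (l.length + 1) l [] []) := by
  have hs1 : 1 ≤ sep.length := by
    cases sep with
    | nil => exact absurd rfl hsep
    | cons a t => simp
  suffices H : ∀ n l fuel (cur : List Char) (acc : List (List Char)), List.length l ≤ n → l.length < fuel →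
      PySem.Chars.splitOn.go sep fuel l cur acc
        = acc.reverse ++ pvGlue cur.reverse (PySem.Chars.splitOn.go sep (l.length + 1) l [] []) by
    exact fun l fuel cur acc h => H l.length l fuel cur acc le_rfl h
  intro n
  induction n with
  | zero =>
    intro l fuel cur acc hn hf
    match l, fuel with
    | [], fuel + 1 =>
      rw [PySem.Chars.splitOn.go] <;> try simp
      rw [PySem.Chars.splitOn.go] <;> simp [pvGlue]
  | succ n IH =>
    intro l fuel cur acc hn hf
    match l, fuel with
    | _, 0 => omega
    | [], fuel + 1 =>
      rw [PySem.Chars.splitOn.go] <;> try simp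
      rw [PySem.Chars.splitOn.go] <;> simp [pvGlue]
    | c :: rest, fuel + 1 =>
      by_cases h : sep.isPrefixOf (c :: rest) = true
      · have hd : (List.drop sep.length (c :: rest)).length < (c :: rest).length := by
          simp [List.length_drop]; omega
        rw [PySem.Chars.splitOn.go]; simp only [h, if_true]
        rw [IH (List.drop sep.length (c :: rest)) fuel [] (cur.reverse :: acc) (by simp at hn hd ⊢; omega) (by omega)]
        -- RHS: unfold go (length+1) (c::rest) [] []
        conv_rhs => rw [PySem.Chars.splitOn.go]
        simp only [h, if_true, List.reverse_nil]
        rw [IH (List.drop sep.length (c :: rest)) ((c :: rest).length) [] [[]] (by simp at hn hd ⊢; omega) (by omega)]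
        simp [pvGlue]
      · rw [PySem.Chars.splitOn.go]
        simp only [h, if_false, Bool.false_eq_true]
        rw [IH rest fuel (c :: cur) acc (by simp at hn ⊢; omega) (by simp at hf ⊢; omega)]
        conv_rhs => rw [PySem.Chars.splitOn.go]
        simp only [h, if_false, Bool.false_eq_true]
        rw [IH rest ((c :: rest).length) [c] [] (by simp at hn ⊢; omega) (by simp)]
        simp [pvGlue_glue]

theorem pvGo_ne_nil (sep : List Char) :
    ∀ fuel l (cur : List Char) (acc : List (List Char)),
      PySem.Chars.splitOn.go sep fuel l cur acc ≠ [] := by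
  intro fuel
  induction fuel with
  | zero => intro l cur acc; rw [PySem.Chars.splitOn.go]; simp
  | succ fuel IH =>
    intro l cur acc
    match l with
    | [] => rw [PySem.Chars.splitOn.go] <;> simp
    | c :: rest =>
      rw [PySem.Chars.splitOn.go]
      by_cases h : sep.isPrefixOf (c :: rest) = true
      · simp only [h, if_true]; exact IH _ _ _
      · simp only [h, if_false, Bool.false_eq_true]; exact IH _ _ _

theorem pvSplitOn_ne_nil (l sep : List Char) : PySem.Chars.splitOn l sep ≠ [] :=
  pvGo_ne_nil sep _ l [] []

theorem pvSplitOn_nil (sep : List Char) (hsep : sep ≠ []) :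
    PySem.Chars.splitOn [] sep = [[]] := by
  rw [PySem.Chars.splitOn, PySem.Chars.splitOn.go] <;> simp

theorem pvSplitOn_cons_match (sep : List Char) (hsep : sep ≠ []) (c : Char) (rest : List Char)
    (h : sep.isPrefixOf (c :: rest) = true) :
    PySem.Chars.splitOn (c :: rest) sep
      = [] :: PySem.Chars.splitOn ((c :: rest).drop sep.length) sep := by
  have hs1 : 1 ≤ sep.length := by
    cases sep with
    | nil => exact absurd rfl hsep
    | cons a t => simp
  have hd : (List.drop sep.length (c :: rest)).length < (c :: rest).length := by
    simp [List.length_drop]; omega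
  rw [PySem.Chars.splitOn, PySem.Chars.splitOn.go]
  simp only [h, if_true, List.reverse_nil]
  rw [pvGo_spec sep hsep _ ((c :: rest).length) [] [[]] (by omega)]
  rw [PySem.Chars.splitOn]
  obtain ⟨x, xs, hx⟩ := List.exists_cons_of_ne_nil
    (pvGo_ne_nil sep ((List.drop sep.length (c :: rest)).length + 1) (List.drop sep.length (c :: rest)) [] [])
  rw [hx]; simp [pvGlue]

theorem pvSplitOn_cons_nomatch (sep : List Char) (hsep : sep ≠ []) (c : Char) (rest : List Char)
    (h : sep.isPrefixOf (c :: rest) = false) :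
    PySem.Chars.splitOn (c :: rest) sep = pvGlue [c] (PySem.Chars.splitOn rest sep) := by
  rw [PySem.Chars.splitOn, PySem.Chars.splitOn.go]
  simp only [h, if_false, Bool.false_eq_true]
  rw [pvGo_spec sep hsep rest ((c :: rest).length) [c] [] (by simp)]
  rw [PySem.Chars.splitOn]
  simp

theorem pvFind_nonneg_of_prefix_drop (s sep : List Char) (j : Nat) (h : sep <+: s.drop j) :
    0 ≤ PySem.Chars.find s sep := by
  have hin : PySem.Chars.isIn sep s = true :=
    (PySem.Chars.exists_prefix_drop_iff_isIn sep s).1 ⟨j, h⟩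
  have := (PySem.Chars.find_ne_neg_one_iff s sep).2 ((PySem.Chars.isIn_iff_infix sep s).1 hin)
  have h2 := PySem.Chars.neg_one_le_find s sep
  omega

theorem pvFind_zero (s sep : List Char) (h : sep.isPrefixOf s = true) :
    PySem.Chars.find s sep = 0 := by
  have hp : sep <+: s := List.isPrefixOf_iff_prefix.1 h
  have h0 : 0 ≤ PySem.Chars.find s sep :=
    pvFind_nonneg_of_prefix_drop s sep 0 (by simpa using hp)
  have hspec := PySem.Chars.find_spec (s := s) (sub := sep) h0
  by_contra hne
  have : 0 < (PySem.Chars.find s sep).toNat := by omega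
  exact hspec.2 0 this (by simpa using hp)

theorem pvFind_cons (sep : List Char) (hsep : sep ≠ []) (c : Char) (rest : List Char)
    (h : sep.isPrefixOf (c :: rest) = false) :
    PySem.Chars.find (c :: rest) sep
      = if PySem.Chars.find rest sep = -1 then -1 else PySem.Chars.find rest sep + 1 := by
  have hnp : ¬ sep <+: (c :: rest) := fun hp => by
    rw [← List.isPrefixOf_iff_prefix] at hp
    rw [hp] at h
    simp at h
  by_cases hr : PySem.Chars.find rest sep = -1
  · simp only [hr, if_true]
    rw [PySem.Chars.find_eq_neg_one_iff] at hr ⊢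
    intro hin
    obtain ⟨j, hj⟩ := (PySem.Chars.exists_prefix_drop_iff_isIn sep (c :: rest)).2
      ((PySem.Chars.isIn_iff_infix sep (c :: rest)).2 hin)
    match j with
    | 0 => exact hnp (by simpa using hj)
    | j + 1 =>
      exact hr ((PySem.Chars.isIn_iff_infix sep rest).1
        ((PySem.Chars.exists_prefix_drop_iff_isIn sep rest).1 ⟨j, by simpa using hj⟩))
  · simp only [hr, if_false]
    have h0r : 0 ≤ PySem.Chars.find rest sep := by
      have := PySem.Chars.neg_one_le_find rest sep; omega
    have hrs := PySem.Chars.find_spec (s := rest) (sub := sep) h0r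
    set j := (PySem.Chars.find rest sep).toNat with hj
    -- candidate position j+1 in c :: rest
    have hpref : sep <+: (c :: rest).drop (j + 1) := by simpa using hrs.1
    have hmin : ∀ i, i < j + 1 → ¬ sep <+: (c :: rest).drop i := by
      intro i hi
      match i with
      | 0 => simpa using hnp
      | i + 1 => simpa using hrs.2 i (by omega)
    have h0 : 0 ≤ PySem.Chars.find (c :: rest) sep :=
      pvFind_nonneg_of_prefix_drop _ _ (j + 1) hpref
    have hspec := PySem.Chars.find_spec (s := c :: rest) (sub := sep) h0
    have hle : (PySem.Chars.find (c :: rest) sep).toNat ≤ j + 1 := by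
      by_contra hgt
      exact hspec.2 (j + 1) (by omega) hpref
    have hge : ¬ (PySem.Chars.find (c :: rest) sep).toNat < j + 1 := fun hlt =>
      hmin _ hlt hspec.1
    omega

def pvLabel (c : Int) : List Char :=
  "line ".toList ++ (PySem.Int.toStr c).toList ++ ": ".toList

def pvRenderA (sep : List Char) : List (List Char) → Int → List Char
  | [], _ => []
  | p :: ps, c => p ++ sep ++ pvLabel c ++ pvRenderA sep ps (c + 1)

def pvRenderAll (sep : List Char) : List (List Char) → Int → List Char
  | [], _ => []
  | [p], _ => p
  | p :: q :: ps, c => p ++ sep ++ pvLabel c ++ pvRenderAll sep (q :: ps) (c + 1)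

theorem pvPyGetNeg1 {α : Type} (xs : List α) (hx : xs ≠ []) :
    PySem.List.pyGet? xs (-1) = xs.getLast? := by
  have hn : 1 ≤ xs.length := List.length_pos_iff.2 hx
  rw [PySem.List.pyGet?, PySem.List.pyIdx?]
  rw [if_neg (by omega), if_pos (by omega : -(xs.length : Int) ≤ -1)]
  simp [List.getLast?_eq_getElem?]

theorem pvRenderAll_eq (sep : List Char) :
    ∀ (xs : List (List Char)) (c : Int), xs ≠ [] →
      pvRenderA sep xs.dropLast c ++ (PySem.List.pyGet? xs (-1)).getD []
        = pvRenderAll sep xs c := by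
  intro xs
  induction xs with
  | nil => intro c h; exact absurd rfl h
  | cons x ys IH =>
    intro c _
    match ys with
    | [] => simp [pvRenderA, pvRenderAll, pvPyGetNeg1]
    | y :: ys' =>
      have h2 : (y :: ys' : List (List Char)) ≠ [] := by simp
      rw [pvPyGetNeg1 _ (by simp)]
      rw [List.getLast?_cons_cons]
      rw [← pvPyGetNeg1 _ h2]
      simp only [pvRenderAll, pvRenderA, List.dropLast_cons_of_ne_nil h2]
      rw [← IH (c + 1) h2]
      simp

theorem pvSplitOn_step (sep : List Char) (hsep : sep ≠ []) (l : List Char) :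
    PySem.Chars.splitOn l sep
      = if PySem.Chars.find l sep = -1 then [l]
        else l.take (PySem.Chars.find l sep).toNat
             :: PySem.Chars.splitOn (l.drop ((PySem.Chars.find l sep).toNat + sep.length)) sep := by
  have hs1 : 1 ≤ sep.length := by
    cases sep with
    | nil => exact absurd rfl hsep
    | cons a t => simp
  suffices H : ∀ n (l : List Char), l.length ≤ n →
      PySem.Chars.splitOn l sep
        = if PySem.Chars.find l sep = -1 then [l]
          else l.take (PySem.Chars.find l sep).toNat
               :: PySem.Chars.splitOn (l.drop ((PySem.Chars.find l sep).toNat + sep.length)) sep by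
    exact H l.length l le_rfl
  intro n
  induction n with
  | zero =>
    intro l hn
    have hl : l = [] := by cases l <;> simp_all
    subst hl
    have hf : PySem.Chars.find [] sep = -1 := by
      rw [PySem.Chars.find_eq_neg_one_iff]
      intro hin
      exact hsep (List.eq_nil_of_infix_nil hin)
    rw [hf, pvSplitOn_nil sep hsep]; simp
  | succ n IH =>
    intro l hn
    match l with
    | [] =>
      have hf : PySem.Chars.find [] sep = -1 := by
        rw [PySem.Chars.find_eq_neg_one_iff]
        intro hin
        exact hsep (List.eq_nil_of_infix_nil hin)
      rw [hf, pvSplitOn_nil sep hsep]; simp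
    | c :: rest =>
      by_cases hpre : sep.isPrefixOf (c :: rest) = true
      · have hf : PySem.Chars.find (c :: rest) sep = 0 := pvFind_zero _ _ hpre
        rw [hf]
        simp only [if_neg (by norm_num : (0 : Int) ≠ -1), Int.toNat_zero, List.take_zero, Nat.zero_add]
        exact pvSplitOn_cons_match sep hsep c rest hpre
      · have hpre' : sep.isPrefixOf (c :: rest) = false := by
          cases hb : sep.isPrefixOf (c :: rest) <;> simp_all
        have hstep := pvSplitOn_cons_nomatch sep hsep c rest hpre'
        have hfc := pvFind_cons sep hsep c rest hpre'
        by_cases hr : PySem.Chars.find rest sep = -1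
        · simp only [hr, if_true] at hfc
          rw [hstep, IH rest (by simp only [List.length_cons] at hn; omega), hfc]
          simp [hr, pvGlue]
        · have h0r : 0 ≤ PySem.Chars.find rest sep := by
            have := PySem.Chars.neg_one_le_find rest sep; omega
          rw [if_neg hr] at hfc
          rw [hstep, IH rest (by simp only [List.length_cons] at hn; omega)]
          rw [if_neg hr, hfc, if_neg (by omega : PySem.Chars.find rest sep + 1 ≠ -1)]
          have htn : (PySem.Chars.find rest sep + 1).toNat = (PySem.Chars.find rest sep).toNat + 1 := by omega
          rw [htn]
          simp [pvGlue, List.take_succ_cons, List.drop_succ_cons, Nat.add_right_comm]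

theorem pvJoin_nil_eq_flatten (parts : List (List Char)) :
    PySem.Chars.join [] parts = parts.flatten := by
  rw [PySem.Chars.join]
  induction parts with
  | nil => simp [List.intercalate]
  | cons x xs IH =>
    match xs with
    | [] => simp [List.intercalate]
    | y :: ys =>
      have hstep : List.intercalate ([] : List Char) (x :: y :: ys)
          = x ++ List.intercalate [] (y :: ys) := by
        simp [List.intercalate]
      rw [hstep, IH]
      simp

theorem pvMain (sep : List Char) (hsep : sep ≠ []) :
    ∀ n (rem : List Char) (fuel : Nat) (c : Int), rem.length ≤ n → rem.length < fuel →
      pvRenderAll sep (PySem.Chars.splitOn rem sep) c = (pvAltGo sep fuel rem c).flatten := by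
  have hs1 : 1 ≤ sep.length := by
    cases sep with
    | nil => exact absurd rfl hsep
    | cons a t => simp
  intro n
  induction n with
  | zero =>
    intro rem fuel c hn hf
    have hl : rem = [] := by cases rem <;> simp_all
    subst hl
    have hfind : PySem.Chars.find [] sep = -1 := by
      rw [PySem.Chars.find_eq_neg_one_iff]
      intro hin
      exact hsep (List.eq_nil_of_infix_nil hin)
    match fuel with
    | fuel + 1 =>
      rw [pvSplitOn_nil sep hsep, pvAltGo]
      simp [hfind, pvRenderAll]
  | succ n IH =>
    intro rem fuel c hn hf
    match fuel with
    | fuel + 1 =>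
      rw [pvSplitOn_step sep hsep rem, pvAltGo]
      by_cases hfind : PySem.Chars.find rem sep = -1
      · simp [hfind, pvRenderAll]
      · rw [if_neg hfind]
        have h0 : 0 ≤ PySem.Chars.find rem sep := by
          have := PySem.Chars.neg_one_le_find rem sep; omega
        have hinfix : sep <:+: rem := by
          by_contra hni
          exact hfind ((PySem.Chars.find_eq_neg_one_iff rem sep).2 hni)
        have hrem : rem ≠ [] := by
          intro h; subst h; exact hsep (List.eq_nil_of_infix_nil hinfix)
        have hrl : 1 ≤ rem.length := List.length_pos_iff.2 hrem
        set j := (PySem.Chars.find rem sep).toNat with hj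
        have hdlen : (List.drop (j + sep.length) rem).length < rem.length := by
          simp [List.length_drop]; omega
        obtain ⟨x, xs, hx⟩ := List.exists_cons_of_ne_nil
          (pvSplitOn_ne_nil (List.drop (j + sep.length) rem) sep)
        rw [hx, pvRenderAll]
        rw [← hx]
        rw [IH (List.drop (j + sep.length) rem) fuel (c + 1)
          (by simp only [List.length_drop]; omega) (by simp only [List.length_drop]; omega)]
        simp [pvLabel, hfind]

theorem pvFoldA (sep : List Char) (t : String) (hts : t.toList = sep) :
    ∀ (ps : List (List Char)) (c : Int) (r : List Char),
      ps.foldl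
        (fun (st : Int × List Char) part =>
          (st.1 + 1,
           st.2 ++ part ++ t.toList ++ "line ".toList
             ++ (PySem.Int.toStr st.1).toList ++ ": ".toList))
        (c, r)
      = (c + ps.length, r ++ pvRenderA sep ps c) := by
  intro ps
  induction ps with
  | nil => intro c r; simp [pvRenderA]
  | cons p ps IH =>
    intro c r
    rw [List.foldl_cons, IH]
    simp [pvRenderA, pvLabel, hts, PySem.Int.toStr]
    omega


theorem pv_final (source_str target_str : String) (h : target_str ≠ "") :
    insert_linenum source_str target_str = insert_linenum_alt source_str target_str := by
  have hsep : target_str.toList ≠ [] := by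
    intro hl
    exact h (by simpa using congrArg String.ofList hl)
  have hemp : target_str.toList.isEmpty = false := by
    simp [hsep]
  rw [insert_linenum, insert_linenum_alt, if_neg h]
  rw [PySem.Chars.split?, hemp]
  simp only [Bool.false_eq_true, if_false]
  set splits := PySem.Chars.splitOn source_str.toList target_str.toList with hsplits
  rw [PySem.List.slice_to_neg_one]
  rw [pvFoldA target_str.toList target_str rfl splits.dropLast 1 []]
  rw [pvJoin_nil_eq_flatten]
  congr 1
  rw [List.nil_append]
  rw [pvRenderAll_eq target_str.toList splits 1 (pvSplitOn_ne_nil _ _)]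
  exact pvMain target_str.toList hsep source_str.toList.length source_str.toList
    (source_str.toList.length + 1) 1 le_rfl (by omega)

-- ===== VERDICT (by name: the statement is the Claim_ definition above) =====
theorem insert_linenum_spec : Claim_equal_insert_linenum :=
  fun source_str target_str _ hpre => pv_final source_str target_str hpre
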